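-- pv_equiv track=rewrite | github.com/minyeamer/til | algorithm/programmers/kakao/solving/n81303.py | cursor_up
-- ===== SOURCE A (Python) =====
-- def cursor_up(cur, mov, table, min_cur):
--     for _ in range(mov):
--         if cur == min_cur:
--             return cur
--         cur -= 1
--         while cur not in table:
--             cur -= 1
--     return cur
-- ===== SOURCE B (Python) =====
-- def cursor_up(cur, mov, table, min_cur):
--     # One closed-form jump over the sorted distinct table positions instead of
--     # simulating the cursor one decrement at a time.
--     if mov <= 0 or cur == min_cur:
--         return cur
--     pos = sorted(set(table))
--     i = sum(1 for t in pos if t < cur) - 1    # index of the largest position below cur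
--     if i < 0:
--         return cur                            # no position below cur at all
--     j = i - (mov - 1)                         # each remaining move drops one index
--     if min_cur in pos and min_cur < cur:
--         j = max(j, pos.index(min_cur))        # the walk stops on reaching min_cur
--     return pos[max(j, 0)]
-- ===== Notes on version B (the rewrite author's own statement) =====
-- stated objective: alternative
-- what changed: B replaces A's step-by-step simulation (mov iterations, each decrementing cur one by one with an 'in table' scan per decrement) by one closed-form jump: it sorts the distinct table positions once, counts how many lie below cur, and indexes the landing position directly, clamping at min_cur's index.
import Mathlib
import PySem

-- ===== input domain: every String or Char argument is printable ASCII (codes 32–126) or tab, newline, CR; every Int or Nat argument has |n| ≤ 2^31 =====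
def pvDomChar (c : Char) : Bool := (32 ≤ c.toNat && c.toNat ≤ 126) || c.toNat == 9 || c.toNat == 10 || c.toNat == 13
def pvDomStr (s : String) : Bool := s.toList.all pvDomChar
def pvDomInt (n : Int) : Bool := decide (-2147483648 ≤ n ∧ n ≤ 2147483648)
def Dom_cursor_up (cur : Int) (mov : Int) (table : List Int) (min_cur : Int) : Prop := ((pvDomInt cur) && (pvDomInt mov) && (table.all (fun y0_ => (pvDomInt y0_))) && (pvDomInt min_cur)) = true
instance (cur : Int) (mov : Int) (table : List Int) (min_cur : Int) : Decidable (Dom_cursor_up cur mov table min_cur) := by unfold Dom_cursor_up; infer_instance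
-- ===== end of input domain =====

-- B replaces A's one-decrement-at-a-time cursor simulation by a single index jump
-- over the sorted distinct table positions (objective: alternative algorithm).


-- ===== PORT A =====
-- 'while cur not in table: cur -= 1', made total with fuel (the fuel is generous
-- enough whenever the Python loop terminates; Pre_ excludes exactly the divergences)
def pvDescend (table : List Int) : Nat → Int → Int
  | 0, c => c
  | n + 1, c => if c ∈ table then c else pvDescend table n (c - 1)

def pvFuel (table : List Int) (c : Int) : Nat := (c - table.foldr min c).toNat + 1

-- 'for _ in range(mov): …' with the early 'return cur' on cur == min_cur
def pvLoopA (table : List Int) (min_cur : Int) : Nat → Int → Int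
  | 0, cur => cur
  | n + 1, cur =>
      if cur = min_cur then cur
      else pvLoopA table min_cur n (pvDescend table (pvFuel table (cur - 1)) (cur - 1))

def cursor_up (cur : Int) (mov : Int) (table : List Int) (min_cur : Int) : Int :=
  pvLoopA table min_cur mov.toNat cur

-- ===== PORT B =====
-- pos = sorted(set(table))
def pvPos (table : List Int) : List Int :=
  PySem.List.sorted (PySem.Set.ofList table) (fun x => x)

def cursor_up_alt (cur : Int) (mov : Int) (table : List Int) (min_cur : Int) : Int :=
  if mov ≤ 0 ∨ cur = min_cur then cur
  else
    let pos := pvPos table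
    let i : Int := (pos.countP (fun t => decide (t < cur)) : Int) - 1
    if i < 0 then cur
    else
      let j : Int := i - (mov - 1)
      let j' : Int := if min_cur ∈ pos ∧ min_cur < cur
                      then max j ((PySem.List.index? pos min_cur).getD 0 : Nat)
                      else j
      -- pos[max(j, 0)]; the 0 default is never used when the index is in range
      PySem.List.pyGetD pos (max j' 0) 0

-- ===== PRECONDITION & SPEC =====
-- Pre_ is exactly the set of inputs on which A's inner while-loop terminates;
-- outside it A decrements cur forever (diverges), so nothing is excluded on which A returns.
def Pre_cursor_up (cur : Int) (mov : Int) (table : List Int) (min_cur : Int) : Prop :=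
  mov ≤ 0 ∨ cur = min_cur ∨ (min_cur ∈ table ∧ min_cur < cur) ∨
    mov ≤ ((PySem.Set.ofList table).countP (fun t => decide (t < cur)) : Int)
instance (cur : Int) (mov : Int) (table : List Int) (min_cur : Int) : Decidable (Pre_cursor_up cur mov table min_cur) := by unfold Pre_cursor_up; infer_instance

def pvWitness_cursor_up : Int × Int × List Int × Int := (5, 2, [1, 2, 3], 1)

def Spec_cursor_up (cur : Int) (mov : Int) (table : List Int) (min_cur : Int) (out : Int) : Prop := out = cursor_up_alt cur mov table min_cur
instance (cur : Int) (mov : Int) (table : List Int) (min_cur : Int) (out : Int) : Decidable (Spec_cursor_up cur mov table min_cur out) := by unfold Spec_cursor_up; infer_instance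

-- ===== CLAIM (what is proved, stated in full; the proofs are below) =====
def Claim_equal_cursor_up : Prop := ∀ (cur : Int) (mov : Int) (table : List Int) (min_cur : Int), Dom_cursor_up cur mov table min_cur → Pre_cursor_up cur mov table min_cur → Spec_cursor_up cur mov table min_cur (cursor_up cur mov table min_cur)

-- ===== LEMMAS AND PROOFS =====

theorem pvPos_pairwise (table : List Int) : (pvPos table).Pairwise (· < ·) := by
  unfold pvPos; exact PySem.List.sorted_ofList_pairwise_lt table

theorem mem_pvPos (table : List Int) (x : Int) : x ∈ pvPos table ↔ x ∈ table := by
  simp [pvPos, PySem.List.mem_sorted, PySem.Set.mem_ofList]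

theorem foldr_min_le (table : List Int) (a g : Int) (hg : g ∈ table) :
    table.foldr min a ≤ g := by
  induction table with
  | nil => cases hg
  | cons x xs ih =>
      rcases List.mem_cons.mp hg with h | h
      · subst h; exact min_le_left _ _
      · exact le_trans (min_le_right _ _) (ih h)

theorem pvDescend_eq (table : List Int) (g : Int) :
    ∀ (fuel : Nat) (c : Int), g ∈ table → g ≤ c → (∀ t ∈ table, t ≤ c → t ≤ g) →
    (c - g).toNat < fuel → pvDescend table fuel c = g := by
  intro fuel
  induction fuel with
  | zero => intro c _ _ _ h; omega
  | succ n ih =>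
      intro c hg hgc hmax hf
      by_cases hc : c ∈ table
      · have hce : c = g := le_antisymm (hmax c hc le_rfl) hgc
        subst hce
        simp [pvDescend, hc]
      · have hne : g ≠ c := fun h => hc (h ▸ hg)
        have hlt : g ≤ c - 1 := by omega
        simp only [pvDescend, if_neg hc]
        exact ih (c - 1) hg hlt (fun t ht htc => hmax t ht (by omega)) (by omega)

theorem pvFuel_ok (table : List Int) (g c : Int) (hg : g ∈ table) :
    (c - g).toNat < pvFuel table c := by
  have := foldr_min_le table c g hg
  unfold pvFuel; omega

-- strictly increasing list: the elements below c are exactly the first countP of them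
theorem strict_countP_iff (c : Int) : ∀ (pos : List Int), pos.Pairwise (· < ·) →
    ∀ (idx : Nat) (hidx : idx < pos.length),
      (pos[idx] < c ↔ idx < pos.countP (fun t => decide (t < c))) := by
  intro pos
  induction pos with
  | nil => intro _ idx hidx; cases hidx
  | cons x xs ih =>
      intro h idx hidx
      have hx : ∀ y ∈ xs, x < y := (List.pairwise_cons.mp h).1
      have hxs := (List.pairwise_cons.mp h).2
      by_cases hxc : x < c
      · have hcount : (x :: xs).countP (fun t => decide (t < c))
            = xs.countP (fun t => decide (t < c)) + 1 := by
          simp [hxc]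
        cases idx with
        | zero => simp [hcount, hxc]
        | succ n =>
            have hn' : n < xs.length := by simpa using hidx
            have := ih hxs n hn'
            simpa [hcount] using this
      · have hall : ∀ y ∈ xs, ¬ y < c := fun y hy hyc => hxc (lt_trans (hx y hy) hyc)
        have hcount : (x :: xs).countP (fun t => decide (t < c)) = 0 := by
          rw [List.countP_eq_zero]
          intro a ha
          rcases List.mem_cons.mp ha with rfl | ha'
          · simpa using hxc
          · simpa using hall a ha'
        cases idx with
        | zero => simp [hcount, hxc]
        | succ n =>
            have hn' : n < xs.length := by simpa using hidx
            simp [hcount, hall xs[n] (List.getElem_mem hn')]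

theorem countP_getElem (pos : List Int) (h : pos.Pairwise (· < ·)) (idx : Nat)
    (hidx : idx < pos.length) :
    pos.countP (fun t => decide (t < pos[idx])) = idx := by
  have h1 := strict_countP_iff pos[idx] pos h idx hidx
  have h2 : ¬ (pos[idx] < pos[idx]) := lt_irrefl _
  have hk : pos.countP (fun t => decide (t < pos[idx])) ≤ idx := by
    by_contra hc
    exact h2 (h1.mpr (by omega))
  cases Nat.eq_zero_or_pos idx with
  | inl h0 => omega
  | inr hpos =>
      have hlt : idx - 1 < pos.length := by omega
      have hm := strict_countP_iff pos[idx] pos h (idx - 1) hlt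
      have : pos[idx - 1] < pos[idx] := by
        have := List.pairwise_iff_getElem.mp h (idx - 1) idx hlt hidx (by omega)
        exact this
      have := hm.mp this
      omega

theorem pvPos_getElem_mono (table : List Int) (p q : Nat) (hpq : p ≤ q)
    (hq : q < (pvPos table).length) :
    (pvPos table)[p]'(by omega) ≤ (pvPos table)[q] := by
  rcases Nat.eq_or_lt_of_le hpq with rfl | hlt
  · exact le_refl _
  · exact le_of_lt (List.pairwise_iff_getElem.mp (pvPos_pairwise table) p q (by omega) hq hlt)

-- the descent from c-1 lands on the largest table position strictly below c,
-- i.e. on pos[k-1] where k counts the positions below c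
theorem pvDescend_pos (table : List Int) (c : Int)
    (hk : 1 ≤ (pvPos table).countP (fun t => decide (t < c))) :
    pvDescend table (pvFuel table (c - 1)) (c - 1)
      = (pvPos table)[(pvPos table).countP (fun t => decide (t < c)) - 1]'(by
          have := List.countP_le_length (l := pvPos table) (p := fun t => decide (t < c))
          omega) := by
  set pos := pvPos table with hpos
  set k := pos.countP (fun t => decide (t < c)) with hkdef
  have hklen : k ≤ pos.length := List.countP_le_length
  have hidx : k - 1 < pos.length := by omega
  have hglt : pos[k - 1] < c := (strict_countP_iff c pos (pvPos_pairwise table) (k - 1) hidx).mpr (by omega)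
  have hgmem : pos[k - 1] ∈ table := (mem_pvPos table _).mp (List.getElem_mem _)
  apply pvDescend_eq table pos[k - 1] (pvFuel table (c - 1)) (c - 1) hgmem (by omega)
  · intro t ht htc
    have htpos : t ∈ pos := (mem_pvPos table t).mpr ht
    rcases List.mem_iff_getElem.mp htpos with ⟨j, hj, rfl⟩
    have : j < k := (strict_countP_iff c pos (pvPos_pairwise table) j hj).mp (by omega)
    exact pvPos_getElem_mono table j (k - 1) (by omega) hidx
  · exact pvFuel_ok table _ _ hgmem

-- pos has no duplicates: equal elements have equal indices
theorem pvPos_getElem_inj (table : List Int) (p q : Nat)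
    (hp : p < (pvPos table).length) (hq : q < (pvPos table).length)
    (h : (pvPos table)[p] = (pvPos table)[q]) : p = q := by
  by_contra hne
  rcases Nat.lt_or_ge p q with hlt | hge
  · exact absurd h (ne_of_lt (List.pairwise_iff_getElem.mp (pvPos_pairwise table) p q hp hq hlt))
  · have hlt : q < p := by omega
    exact absurd h.symm (ne_of_lt (List.pairwise_iff_getElem.mp (pvPos_pairwise table) q p hq hp hlt))

theorem getElem_idx_eq (l : List Int) (a b : Nat) (ha : a < l.length) (h : a = b) :
    l[a] = l[b]'(h ▸ ha) := by subst h; rfl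

-- A's one loop iteration from a table position pos[i] (i ≥ 1) lands on pos[i-1]
theorem pvStep (table : List Int) (i : Nat) (hi : i < (pvPos table).length) (h1 : 1 ≤ i) :
    pvDescend table (pvFuel table ((pvPos table)[i] - 1)) ((pvPos table)[i] - 1)
      = (pvPos table)[i - 1]'(by omega) := by
  have hk := countP_getElem (pvPos table) (pvPos_pairwise table) i hi
  have hstep := pvDescend_pos table (pvPos table)[i] (by omega)
  exact hstep.trans (getElem_idx_eq _ _ _ _ (by omega))

-- loop from pos[i], min_cur sits at index m ≤ i: walk down one index per step, stop at m
theorem pvLoopA_min (table : List Int) (min_cur : Int) (m : Nat)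
    (hmv : ∀ (h : m < (pvPos table).length), (pvPos table)[m] = min_cur) :
    ∀ (n i : Nat) (hi : i < (pvPos table).length) (hm : m ≤ i),
      pvLoopA table min_cur n (pvPos table)[i] = (pvPos table)[max m (i - n)]'(by omega) := by
  intro n
  induction n with
  | zero =>
      intro i hi hm
      simp only [pvLoopA]
      exact getElem_idx_eq _ _ _ _ (by omega)
  | succ n ih =>
      intro i hi hm
      have hmlen : m < (pvPos table).length := by omega
      by_cases hcur : (pvPos table)[i] = min_cur
      · have hmi : m = i := pvPos_getElem_inj table m i hmlen hi (by rw [hmv hmlen, hcur])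
        subst hmi
        simp only [pvLoopA, if_pos hcur]
        exact getElem_idx_eq _ _ _ _ (by omega)
      · have hmi : m < i := by
          rcases Nat.eq_or_lt_of_le hm with rfl | h
          · exact absurd (hmv hmlen) hcur
          · exact h
        simp only [pvLoopA, if_neg hcur, pvStep table i hi (by omega)]
        rw [ih (i - 1) (by omega) (by omega)]
        exact getElem_idx_eq _ _ _ _ (by omega)

-- loop from pos[i] when min_cur is not among pos[0..i]: n ≤ i plain index steps
theorem pvLoopA_cnt (table : List Int) (min_cur : Int) :
    ∀ (n i : Nat) (hi : i < (pvPos table).length) (hn : n ≤ i)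
      (_hnm : ∀ (j : Nat) (hj : j < (pvPos table).length), j ≤ i → (pvPos table)[j] ≠ min_cur),
      pvLoopA table min_cur n (pvPos table)[i] = (pvPos table)[i - n]'(by omega) := by
  intro n
  induction n with
  | zero => intro i hi _ _; simp [pvLoopA]
  | succ n ih =>
      intro i hi hn hnm
      have hcur : (pvPos table)[i] ≠ min_cur := hnm i hi (le_refl i)
      simp only [pvLoopA, if_neg hcur, pvStep table i hi (by omega)]
      rw [ih (i - 1) (by omega) (by omega) (fun j hj hji => hnm j hj (by omega))]
      exact getElem_idx_eq _ _ _ _ (by omega)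

theorem countP_set_eq (table : List Int) (c : Int) :
    (PySem.Set.ofList table).countP (fun t => decide (t < c))
      = (pvPos table).countP (fun t => decide (t < c)) :=
  (List.Perm.countP_eq _ (PySem.List.sorted_perm _ _ _)).symm

-- ===== VERDICT (by name: the statement is the Claim_ definition above) =====
theorem cursor_up_spec : Claim_equal_cursor_up := by
  intro cur mov table min_cur _ hpre
  unfold Spec_cursor_up cursor_up cursor_up_alt
  by_cases h0 : mov ≤ 0 ∨ cur = min_cur
  · rw [if_pos h0]
    rcases h0 with h | h
    · have h' : mov.toNat = 0 := by omega
      simp [h', pvLoopA]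
    · cases hn : mov.toNat with
      | zero => simp [pvLoopA]
      | succ n => simp [pvLoopA, h]
  · rcases not_or.mp h0 with ⟨h1, hne⟩
    have hmov : 0 < mov := by omega
    rw [if_neg h0]
    dsimp only
    obtain ⟨k, hk⟩ : ∃ k, (pvPos table).countP (fun t => decide (t < cur)) = k := ⟨_, rfl⟩
    have hklen : k ≤ (pvPos table).length := hk ▸ List.countP_le_length
    have hcntA : ∀ (m : Nat) (hm : m < (pvPos table).length),
        ((pvPos table)[m] < cur ↔ m < k) := by
      intro m hm
      rw [← hk]
      exact strict_countP_iff cur (pvPos table) (pvPos_pairwise table) m hm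
    have hk1 : 1 ≤ k := by
      rcases hpre with h | h | ⟨hmem, hlt⟩ | hcnt
      · omega
      · exact absurd h hne
      · obtain ⟨m, hm, hmv⟩ := List.mem_iff_getElem.mp ((mem_pvPos table min_cur).mpr hmem)
        have := (hcntA m hm).mp (by omega)
        omega
      · rw [countP_set_eq table cur, hk] at hcnt
        omega
    rw [hk]
    rw [if_neg (show ¬((k : Int) - 1 < 0) by omega)]
    cases hn : mov.toNat with
    | zero => omega
    | succ n =>
        have hmovn : mov = (n : Int) + 1 := by omega
        have hstep := pvDescend_pos table cur (by rw [hk]; omega)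
        have hconv := getElem_idx_eq (pvPos table)
          ((pvPos table).countP (fun t => decide (t < cur)) - 1) (k - 1)
          (by rw [hk]; omega) (by rw [hk])
        simp only [pvLoopA, if_neg hne]
        rw [hstep, hconv]
        by_cases hmin : min_cur ∈ pvPos table ∧ min_cur < cur
        · rw [if_pos hmin]
          obtain ⟨m, hidx⟩ := Option.isSome_iff_exists.mp
            ((PySem.List.index?_isSome_iff (xs := pvPos table) (v := min_cur)).mpr hmin.1)
          obtain ⟨hm, hmv, _⟩ := PySem.List.getElem_of_index?_eq_some hidx
          have hmk : m < k := by
            have := (hcntA m hm).mp (by omega)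
            omega
          rw [pvLoopA_min table min_cur m (fun _ => hmv) n (k - 1) (by omega) (by omega)]
          rw [hidx]
          simp only [Option.getD_some]
          have hix : max (max ((k : Int) - 1 - (mov - 1)) (m : Int)) 0
              = ((max m (k - 1 - n) : Nat) : Int) := by push_cast; omega
          rw [hix, PySem.List.pyGetD_natCast]
          exact (List.getD_eq_getElem _ _ (by omega)).symm
        · rw [if_neg hmin]
          have hcnt : mov ≤ (k : Int) := by
            rcases hpre with h | h | h | hcnt
            · omega
            · exact absurd h hne
            · exact absurd ⟨(mem_pvPos table min_cur).mpr h.1, h.2⟩ hmin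
            · rw [countP_set_eq table cur, hk] at hcnt
              exact hcnt
          have hnm : ∀ (j : Nat) (hj : j < (pvPos table).length), j ≤ k - 1 →
              (pvPos table)[j] ≠ min_cur := by
            intro j hj hjk heq
            have hjlt : (pvPos table)[j] < cur := (hcntA j hj).mpr (by omega)
            exact hmin ⟨heq ▸ List.getElem_mem _, by omega⟩
          rw [pvLoopA_cnt table min_cur n (k - 1) (by omega) (by omega) hnm]
          have hix : max ((k : Int) - 1 - (mov - 1)) 0 = ((k - 1 - n : Nat) : Int) := by
            omega
          rw [hix, PySem.List.pyGetD_natCast]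
          exact (List.getD_eq_getElem _ _ (by omega)).symm
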